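-- pv_equiv track=rewrite | github.com/youcefjd/restaurant-ai-managed | backend/services/openai_tts_service.py | _linear_to_mulaw
-- ===== SOURCE A (Python) =====
-- MULAW_BIAS = 0x84
--
-- MULAW_CLIP = 32635
--
-- def _linear_to_mulaw(sample: int) -> int:
--     """Convert a 16-bit signed linear sample to 8-bit mulaw."""
--     sign = (sample >> 8) & 0x80
--     if sign:
--         sample = -sample
--     sample = min(sample, MULAW_CLIP)
--     sample += MULAW_BIAS
--
--     exponent = 7
--     for exp in range(7, -1, -1):
--         if sample & (1 << (exp + 7)):
--             exponent = exp
--             break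
--
--     mantissa = (sample >> (exponent + 3)) & 0x0F
--     mulaw_byte = ~(sign | (exponent << 4) | mantissa)
--     return mulaw_byte & 0xFF
-- ===== SOURCE B (Python) =====
-- MULAW_BIAS = 0x84
--
-- MULAW_CLIP = 32635
--
-- # mulaw quantization decision thresholds: biased magnitude b is encoded as the
-- # index q of the last threshold <= b, i.e. b in [(16+t)<<(e+3), (17+t)<<(e+3)).
-- _THRESHOLDS = [(16 + t) << (e + 3) for e in range(8) for t in range(16)]
--
--
-- def _linear_to_mulaw(sample: int) -> int:
--     """Convert a 16-bit signed linear sample to 8-bit mulaw (threshold bisection)."""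
--     sign = (sample >> 8) & 0x80
--     if sign:
--         sample = -sample
--     biased = min(sample, MULAW_CLIP) + MULAW_BIAS
--     lo, hi = 0, len(_THRESHOLDS)
--     while hi - lo > 1:
--         mid = lo + (hi - lo) // 2
--         if _THRESHOLDS[mid] <= biased:
--             lo = mid
--         else:
--             hi = mid
--     return ~(sign | lo) & 0xFF
-- ===== Notes on version B (the rewrite author's own statement) =====
-- stated objective: alternative
-- what changed: Instead of extracting an exponent by a descending bit scan and a mantissa by shifting and masking, B precomputes the table of mulaw quantization decision thresholds once and finds the output code by binary search (bisection) over that table.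
-- outside the precondition, e.g. on _linear_to_mulaw(40000): A returns 6, B returns 127
import Mathlib
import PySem

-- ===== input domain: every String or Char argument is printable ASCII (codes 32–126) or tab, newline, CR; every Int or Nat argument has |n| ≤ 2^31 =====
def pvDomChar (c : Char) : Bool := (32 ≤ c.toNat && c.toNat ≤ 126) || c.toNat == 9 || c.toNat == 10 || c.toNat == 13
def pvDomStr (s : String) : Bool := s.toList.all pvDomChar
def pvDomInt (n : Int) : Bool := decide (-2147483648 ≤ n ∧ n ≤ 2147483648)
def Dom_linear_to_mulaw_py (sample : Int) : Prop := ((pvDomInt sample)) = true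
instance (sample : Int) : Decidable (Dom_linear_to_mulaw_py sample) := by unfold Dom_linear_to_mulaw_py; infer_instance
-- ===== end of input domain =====

-- B replaces A's exponent/mantissa bit extraction by a binary search over the precomputed
-- table of mulaw quantization thresholds (alternative algorithm; same byte on every admitted input).

-- ===== PORT A =====
-- the loop `for exp in range(7,-1,-1): if sample & (1 << (exp+7)): exponent = exp; break`,
-- started at exponent = 7; `.toNat` on the shift count is exact: every e of the range list
-- is nonnegative
def mulawLoopA (s : Int) : List Int → Int
  | [] => 7
  | e :: rest => if PySem.Int.band s (1 <<< (e + 7).toNat) ≠ 0 then e else mulawLoopA s rest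

def linear_to_mulaw_py (sample : Int) : Int :=
  let sign := PySem.Int.band (sample >>> (8:Nat)) 0x80
  let sample := if sign ≠ 0 then -sample else sample
  let sample := min sample 32635
  let sample := sample + 0x84
  let exponent := mulawLoopA sample (PySem.List.pyRange 7 (-1) (-1))
  -- `.toNat` exact: exponent ∈ [0,7]
  let mantissa := PySem.Int.band (sample >>> (exponent + 3).toNat) 0x0F
  PySem.Int.band (Int.not (PySem.Int.bor sign (PySem.Int.bor (exponent <<< (4:Nat)) mantissa))) 0xFF

-- ===== PORT B =====
-- the comprehension `[(16 + t) << (e + 3) for e in range(8) for t in range(16)]`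
def pvThresholds : List Int :=
  (List.range 8).flatMap (fun e => (List.range 16).map (fun t => ((16 + t : Int)) <<< (e + 3)))

-- the `while hi - lo > 1` bisection loop; lo/hi stay within the table bounds so Nat and
-- `//2 = /2` are exact, and the index mid is always in range, so `.getD 0` never supplies its default
def pvBSearch (b : Int) (lo hi : Nat) : Nat :=
  if h : hi - lo > 1 then
    let mid := lo + (hi - lo) / 2
    if (PySem.List.pyGet? pvThresholds (mid : Int)).getD 0 ≤ b then pvBSearch b mid hi
    else pvBSearch b lo mid
  else lo
termination_by hi - lo
decreasing_by all_goals omega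

def linear_to_mulaw_py_alt (sample : Int) : Int :=
  let sign := PySem.Int.band (sample >>> (8:Nat)) 0x80
  let sample := if sign ≠ 0 then -sample else sample
  let biased := min sample 32635 + 0x84
  let lo := pvBSearch biased 0 pvThresholds.length
  PySem.Int.band (Int.not (PySem.Int.bor sign (lo : Int))) 0xFF

-- ===== PRECONDITION & SPEC =====
-- Pre_ restricts to samples whose sixteen-bit sign bit agrees with their actual sign — in
-- particular the whole natural sixteen-bit domain of A's docstring; outside it A's sixteen-bit
-- sign extraction aliases, its negation/clipping produce a negative "magnitude", and the bit
-- scan runs on its two's-complement image — an accident of A's implementation.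
def Pre_linear_to_mulaw_py (sample : Int) : Prop :=
  (0 ≤ sample ∧ sample % 65536 < 32768) ∨ (sample < 0 ∧ 32768 ≤ sample % 65536)
instance (sample : Int) : Decidable (Pre_linear_to_mulaw_py sample) := by
  unfold Pre_linear_to_mulaw_py; infer_instance

def pvWitness_linear_to_mulaw_py : Int := (1000)

def Spec_linear_to_mulaw_py (sample : Int) (out : Int) : Prop := out = linear_to_mulaw_py_alt sample
instance (sample : Int) (out : Int) : Decidable (Spec_linear_to_mulaw_py sample out) := by unfold Spec_linear_to_mulaw_py; infer_instance

-- ===== CLAIM (what is proved, stated in full; the proofs are below) =====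
def Claim_equal_linear_to_mulaw_py : Prop := ∀ (sample : Int), Dom_linear_to_mulaw_py sample → Pre_linear_to_mulaw_py sample → Spec_linear_to_mulaw_py sample (linear_to_mulaw_py sample)

-- ===== LEMMAS AND PROOFS =====

-- floor division/mod of -n-1 by a positive p, in terms of those of n
theorem pv_negsucc_divmod (n : Nat) (p : Int) (hp : 0 < p) :
    (-(n:Int)-1)/p = -((n:Int)/p) - 1 ∧ (-(n:Int)-1)%p = p - 1 - (n:Int)%p := by
  have h1 : (0:Int) ≤ (n:Int) % p := Int.emod_nonneg _ (by omega)
  have h2 : (n:Int) % p < p := Int.emod_lt_of_pos _ hp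
  have h3 : (n:Int) % p + p * ((n:Int)/p) = n := Int.emod_add_mul_ediv _ _
  have h := (Int.ediv_emod_unique (a := -(n:Int)-1) (b := p)
      (r := p - 1 - (n:Int)%p) (q := -((n:Int)/p) - 1) hp).mpr
      ⟨by ring_nf; ring_nf at h3; linarith, by omega, by omega⟩
  exact ⟨h.1, h.2⟩

-- Python's  a & (1 << j)  as floor arithmetic
theorem pv_band_two_pow (a : Int) (j : Nat) :
    PySem.Int.band a (2^j) = a / 2^j % 2 * 2^j := by
  have hcast : ((2:Int)^j) = ((2^j : Nat) : Int) := by push_cast; ring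
  have hp : (0:Int) < 2^j := by positivity
  unfold PySem.Int.band
  by_cases ha : 0 ≤ a
  · rw [if_pos ha, if_pos (le_of_lt hp)]
    obtain ⟨m, rfl⟩ := Int.eq_ofNat_of_zero_le ha
    rw [hcast, Int.toNat_natCast, Int.toNat_natCast, Nat.and_two_pow, Nat.toNat_testBit]
    push_cast
    ring
  · rw [if_neg ha, if_pos (le_of_lt hp)]
    have hn : a = -((-a-1).toNat : Int) - 1 := by omega
    set n := (-a-1).toNat with hndef
    have hp' : (0:Int) < ((2^j : Nat) : Int) := by positivity
    have hd := pv_negsucc_divmod n ((2^j : Nat) : Int) hp'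
    rw [hcast, Int.toNat_natCast, Nat.and_comm, Nat.and_two_pow, Nat.toNat_testBit, hn, hd.1]
    have hq : ((n:Int))/((2^j : Nat):Int) = ((n / 2^j : Nat) : Int) := by push_cast; ring
    rw [hq]
    generalize (n / 2^j : Nat) = k
    have h2 : ((-(k:Int))-1)%2 = 1 - ((k % 2 : Nat) : Int) := by push_cast; omega
    rw [h2]
    rcases Nat.mod_two_eq_zero_or_one k with h|h <;> rw [h] <;> simp

-- Python's  a & (2^k - 1)  as floor mod
theorem pv_band_mask (a : Int) (k : Nat) :
    PySem.Int.band a (2^k - 1) = a % 2^k := by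
  have h1 : (1:Nat) ≤ 2^k := Nat.one_le_two_pow
  have hcast : ((2:Int)^k - 1) = ((2^k - 1 : Nat) : Int) := by push_cast [h1]; ring
  have hm : (0:Int) ≤ 2^k - 1 := by have : (1:Int) ≤ 2^k := one_le_pow₀ (by norm_num); omega
  unfold PySem.Int.band
  by_cases ha : 0 ≤ a
  · rw [if_pos ha, if_pos hm]
    obtain ⟨m, rfl⟩ := Int.eq_ofNat_of_zero_le ha
    rw [hcast, Int.toNat_natCast, Int.toNat_natCast, Nat.and_two_pow_sub_one_eq_mod]
    push_cast
    ring
  · rw [if_neg ha, if_pos hm]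
    have hn : a = -((-a-1).toNat : Int) - 1 := by omega
    set n := (-a-1).toNat with hndef
    have hp' : (0:Int) < ((2^k : Nat) : Int) := by positivity
    have hd := (pv_negsucc_divmod n ((2^k : Nat) : Int) hp').2
    have hq : ((n:Int)) % ((2^k : Nat):Int) = ((n % 2^k : Nat) : Int) := by push_cast; ring
    rw [hq] at hd
    rw [hcast, Int.toNat_natCast, Nat.and_comm, Nat.and_two_pow_sub_one_eq_mod, hn]
    rw [show ((2:Int)^k) = ((2^k : Nat) : Int) from by push_cast; ring, hd]
    have hlt : n % 2^k < 2^k := Nat.mod_lt _ (Nat.two_pow_pos k)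
    generalize hP : (2^k : Nat) = P at *
    omega

-- the quantization threshold with index q (q ≤ 128): pvThr q = (16 + q%16) · 2^(q/16+3)
def pvThr (q : Nat) : Int := (16 + ((q % 16 : Nat) : Int)) * 2^(q / 16 + 3)

set_option maxRecDepth 10000 in
theorem pvThr_getF : ∀ m : Fin 128,
    (PySem.List.pyGet? pvThresholds ((m : Nat) : Int)).getD 0 = pvThr (m : Nat) := by decide

theorem pvThr_get (m : Nat) (hm : m < 128) :
    (PySem.List.pyGet? pvThresholds (m : Int)).getD 0 = pvThr m := pvThr_getF ⟨m, hm⟩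

theorem pvThr_stepF : ∀ q : Fin 128, pvThr (q : Nat) < pvThr ((q : Nat) + 1) := by decide

theorem pvThr_mono (q r : Nat) (h : q ≤ r) (hr : r ≤ 128) : pvThr q ≤ pvThr r := by
  induction r with
  | zero =>
    have : q = 0 := by omega
    simp [this]
  | succ n ih =>
    rcases Nat.lt_or_ge q (n+1) with h'|h'
    · exact le_trans (ih (by omega) (by omega)) (le_of_lt (pvThr_stepF ⟨n, by omega⟩))
    · have : q = n + 1 := by omega
      simp [this]

-- the bisection keeps the bracket  pvThr lo ≤ b < pvThr hi  and ends on a unit bracket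
theorem pvBSearch_bracket : ∀ (n : Nat) (b : Int) (lo hi : Nat), hi - lo = n →
    lo < hi → hi ≤ 128 → pvThr lo ≤ b → b < pvThr hi →
    lo ≤ pvBSearch b lo hi ∧ pvBSearch b lo hi < hi ∧
      pvThr (pvBSearch b lo hi) ≤ b ∧ b < pvThr (pvBSearch b lo hi + 1) := by
  intro n
  induction n using Nat.strong_induction_on with
  | _ n ih =>
    intro b lo hi hn hlh hhi h1 h2
    rw [pvBSearch]
    by_cases hgt : hi - lo > 1
    · rw [dif_pos hgt]
      dsimp only
      have hmid : lo + (hi - lo) / 2 < 128 := by omega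
      rw [pvThr_get _ hmid]
      by_cases hc : pvThr (lo + (hi - lo) / 2) ≤ b
      · rw [if_pos hc]
        have h := ih (hi - (lo + (hi - lo) / 2)) (by omega) b _ hi rfl (by omega) hhi hc h2
        exact ⟨by omega, h.2.1, h.2.2⟩
      · rw [if_neg hc]
        have h := ih ((lo + (hi - lo) / 2) - lo) (by omega) b lo _ rfl (by omega) (by omega)
          h1 (by omega)
        exact ⟨h.1, by omega, h.2.2⟩
    · rw [dif_neg hgt]
      have : hi = lo + 1 := by omega
      subst this
      exact ⟨le_refl _, by omega, h1, h2⟩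

theorem pvThr_unique (b : Int) (v r : Nat) (hv : v < 128) (hr : r < 128)
    (h1 : pvThr v ≤ b) (h2 : b < pvThr (v+1)) (h3 : pvThr r ≤ b) (h4 : b < pvThr (r+1)) :
    v = r := by
  rcases lt_trichotomy v r with h|h|h
  · exact absurd (lt_of_lt_of_le h2 (le_trans (pvThr_mono (v+1) r (by omega) (by omega)) h3))
      (lt_irrefl b)
  · exact h
  · exact absurd (lt_of_lt_of_le h4 (le_trans (pvThr_mono (r+1) v (by omega) (by omega)) h1))
      (lt_irrefl b)

-- A's descending bit scan finds the floor-log segment of b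
theorem loopA_char (b : Int) (h1 : 128 ≤ b) (h2 : b < 32768) :
    ∃ e : Nat, mulawLoopA b (PySem.List.pyRange 7 (-1) (-1)) = (e : Int) ∧ e ≤ 7 ∧
      (2:Int)^(e+7) ≤ b ∧ b < 2^(e+8) := by
  have hr : PySem.List.pyRange 7 (-1) (-1) = [7,6,5,4,3,2,1,0] := by decide
  have b14 := pv_band_two_pow b 14
  have b13 := pv_band_two_pow b 13
  have b12 := pv_band_two_pow b 12
  have b11 := pv_band_two_pow b 11
  have b10 := pv_band_two_pow b 10
  have b9 := pv_band_two_pow b 9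
  have b8 := pv_band_two_pow b 8
  have b7 := pv_band_two_pow b 7
  norm_num at b14 b13 b12 b11 b10 b9 b8 b7
  rw [hr]
  simp only [mulawLoopA,
    show (((1 <<< ((7:Int)+7).toNat : Int))) = 16384 from by decide,
    show (((1 <<< ((6:Int)+7).toNat : Int))) = 8192 from by decide,
    show (((1 <<< ((5:Int)+7).toNat : Int))) = 4096 from by decide,
    show (((1 <<< ((4:Int)+7).toNat : Int))) = 2048 from by decide,
    show (((1 <<< ((3:Int)+7).toNat : Int))) = 1024 from by decide,
    show (((1 <<< ((2:Int)+7).toNat : Int))) = 512 from by decide,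
    show (((1 <<< ((1:Int)+7).toNat : Int))) = 256 from by decide,
    show (((1 <<< ((0:Int)+7).toNat : Int))) = 128 from by decide,
    b14, b13, b12, b11, b10, b9, b8, b7]
  split_ifs with h14 h13 h12 h11 h10 h9 h8 h7
  · exact ⟨7, rfl, by omega, by norm_num; omega, by norm_num; omega⟩
  · exact ⟨6, rfl, by omega, by norm_num; omega, by norm_num; omega⟩
  · exact ⟨5, rfl, by omega, by norm_num; omega, by norm_num; omega⟩
  · exact ⟨4, rfl, by omega, by norm_num; omega, by norm_num; omega⟩
  · exact ⟨3, rfl, by omega, by norm_num; omega, by norm_num; omega⟩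
  · exact ⟨2, rfl, by omega, by norm_num; omega, by norm_num; omega⟩
  · exact ⟨1, rfl, by omega, by norm_num; omega, by norm_num; omega⟩
  · exact ⟨0, rfl, by omega, by norm_num; omega, by norm_num; omega⟩
  · exfalso; omega

theorem pvThr_valF : ∀ (e : Fin 8) (m : Fin 16),
    pvThr (16 * (e : Nat) + (m : Nat)) = (16 + (m : Nat)) * 2^((e : Nat)+3) ∧
    pvThr (16 * (e : Nat) + (m : Nat) + 1) = (17 + (m : Nat)) * 2^((e : Nat)+3) := by decide

theorem pv_natCast_shiftLeft (m k : Nat) : ((m : Int) <<< k) = ((m <<< k : Nat) : Int) := by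
  simp [Int.shiftLeft_eq, Nat.shiftLeft_eq]

theorem pv_code_lorF : ∀ (e : Fin 8) (m : Fin 16),
    ((e : Nat) <<< 4) ||| (m : Nat) = 16 * (e : Nat) + (m : Nat) := by decide

-- A's (exponent << 4) | mantissa equals the bisection's index, for biased b in range
theorem main_code (b : Int) (h1 : 132 ≤ b) (h2 : b ≤ 32767) :
    PySem.Int.bor ((mulawLoopA b (PySem.List.pyRange 7 (-1) (-1))) <<< (4:Nat))
        (PySem.Int.band (b >>> ((mulawLoopA b (PySem.List.pyRange 7 (-1) (-1)) + 3).toNat)) 0x0F)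
      = (pvBSearch b 0 128 : Int) := by
  obtain ⟨e, he, he7, hlb, hub⟩ := loopA_char b (by omega) (by omega)
  rw [he]
  have hpos : (0:Int) < 2^(e+3) := by positivity
  have htn : (((e:Int)) + 3).toNat = e + 3 := by omega
  have hsh : b >>> (e + 3) = b / 2^(e+3) := by rw [Int.shiftRight_eq_div_pow]; norm_cast
  have hmask := pv_band_mask (b / 2^(e+3)) 4
  norm_num at hmask
  have hq16 : 16 ≤ b / 2^(e+3) := by
    rw [Int.le_ediv_iff_mul_le hpos]
    calc (16:Int) * 2^(e+3) = 2^(e+7) := by ring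
    _ ≤ b := hlb
  have hq32 : b / 2^(e+3) < 32 := by
    rw [Int.ediv_lt_iff_lt_mul hpos]
    calc b < 2^(e+8) := hub
    _ = 32 * 2^(e+3) := by ring
  set q := b / 2^(e+3) with hqdef
  have hmant : PySem.Int.band (b >>> ((((e:Int)) + 3).toNat)) 0x0F = ((q - 16).toNat : Int) := by
    rw [htn, hsh, hmask]
    omega
  rw [hmant]
  set m := (q - 16).toNat with hmdef
  have hm16 : m < 16 := by omega
  have hqm : (q : Int) = 16 + (m : Int) := by omega
  -- the left side is the Nat code 16*e + m
  have hlor : PySem.Int.bor (((e:Nat) : Int) <<< (4:Nat)) ((m : Nat) : Int)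
      = ((16 * e + m : Nat) : Int) := by
    rw [pv_natCast_shiftLeft, PySem.Int.bor_natCast]
    exact congrArg _ (pv_code_lorF ⟨e, by omega⟩ ⟨m, hm16⟩)
  rw [hlor]
  -- both codes satisfy the same unit threshold bracket, hence are equal
  have hval := pvThr_valF ⟨e, by omega⟩ ⟨m, hm16⟩
  simp only [] at hval
  have hbr1 : pvThr (16 * e + m) ≤ b := by
    rw [hval.1]
    calc ((16 + (m:Nat) : Int)) * 2^(e+3) = q * 2^(e+3) := by rw [hqm]
    _ ≤ b := Int.ediv_mul_le b (by positivity)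
  have hbr2 : b < pvThr (16 * e + m + 1) := by
    rw [hval.2]
    calc b < (q + 1) * 2^(e+3) := Int.lt_ediv_add_one_mul_self b hpos
    _ = ((17 + (m:Nat) : Int)) * 2^(e+3) := by rw [hqm]; ring
  have hs := pvBSearch_bracket 128 b 0 128 rfl (by omega) (le_refl _)
    (by unfold pvThr; norm_num; omega) (by unfold pvThr; norm_num; omega)
  have := pvThr_unique b (16 * e + m) (pvBSearch b 0 128) (by omega) (by omega)
    hbr1 hbr2 hs.2.2.1 hs.2.2.2
  rw [← this]

-- the 16-bit sign bit read by both ports, under Pre_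
theorem pv_sign (sample : Int) (hpre : Pre_linear_to_mulaw_py sample) :
    (PySem.Int.band (sample >>> (8:Nat)) 0x80 = 0 ∧ 0 ≤ sample) ∨
    (PySem.Int.band (sample >>> (8:Nat)) 0x80 = 128 ∧ sample < 0) := by
  have hsh : sample >>> (8:Nat) = sample / 256 := by
    rw [Int.shiftRight_eq_div_pow]; norm_num
  have hb := pv_band_two_pow (sample / 256) 7
  norm_num at hb
  rw [hsh, hb]
  have hdd : sample / 256 / 128 = sample / 32768 := by omega
  rw [hdd]
  rcases hpre with ⟨h0, hm⟩ | ⟨h0, hm⟩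
  · left; constructor
    · omega
    · exact h0
  · right; constructor
    · omega
    · exact h0

-- ===== VERDICT (by name: the statement is the Claim_ definition above) =====
theorem linear_to_mulaw_py_spec : Claim_equal_linear_to_mulaw_py := by
  intro sample hdom hpre
  unfold Spec_linear_to_mulaw_py linear_to_mulaw_py linear_to_mulaw_py_alt
  dsimp only
  have hlen : pvThresholds.length = 128 := by simp [pvThresholds]
  rw [hlen]
  rcases pv_sign sample hpre with ⟨hs, h0⟩ | ⟨hs, h0⟩ <;>
    simp only [hs, ne_eq, not_false_eq_true, if_true, if_false,
      (by norm_num : ¬((0:Int) ≠ 0)), (by norm_num : ((128:Int) ≠ 0))] <;>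
  · rw [main_code _ (by omega) (by omega)]
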